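-- pv_equiv track=rewrite | github.com/LucianoBDN/python_practica | Arrays/matrices/Practica_matrices/Package_Input/Generales.py | sumar_recaudacion_linea
-- ===== SOURCE A (Python) =====
-- def sumar_recaudacion_linea(lista: list) -> list:
--     recaudacion_linea_1 = 0
--     recaudacion_linea_2 = 0
--     recaudacion_linea_3 = 0
--     for i in range(len(lista)):
--         if lista[i][0] == 1:
--             recaudacion_linea_1 += lista[i][2]
--         elif lista[i][0] == 2:
--             recaudacion_linea_2 += lista[i][2]
--         else:
--             recaudacion_linea_3 += lista[i][2]
--
--     return recaudacion_linea_1, recaudacion_linea_2, recaudacion_linea_3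
-- ===== SOURCE B (Python) =====
-- def sumar_recaudacion_linea(lista: list) -> list:
--     r1 = sum(x[2] for x in lista if x[0] == 1)
--     r2 = sum(x[2] for x in lista if x[0] == 2)
--     r3 = sum(x[2] for x in lista if x[0] not in (1, 2))
--     return r1, r2, r3
-- ===== Notes on version B (the rewrite author's own statement) =====
-- stated objective: idiomatic
-- what changed: Replaces the single index-driven accumulating loop with three independent filtered generator-sum passes, one per bucket, with the else branch expressed as the catch-all condition 'x[0] not in (1, 2)'.
import Mathlib
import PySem

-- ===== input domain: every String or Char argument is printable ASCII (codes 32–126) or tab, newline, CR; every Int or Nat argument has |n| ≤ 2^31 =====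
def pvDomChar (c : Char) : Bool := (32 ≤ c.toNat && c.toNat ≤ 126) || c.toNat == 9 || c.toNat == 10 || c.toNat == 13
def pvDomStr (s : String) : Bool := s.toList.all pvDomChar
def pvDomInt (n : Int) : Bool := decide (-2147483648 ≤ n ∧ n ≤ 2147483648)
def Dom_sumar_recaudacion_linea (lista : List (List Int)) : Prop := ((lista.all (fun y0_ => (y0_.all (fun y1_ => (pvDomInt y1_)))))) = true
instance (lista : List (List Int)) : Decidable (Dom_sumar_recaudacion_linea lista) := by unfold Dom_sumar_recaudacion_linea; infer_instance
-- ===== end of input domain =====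

-- B replaces A's single index-driven accumulating loop by three independent filtered
-- sum passes (one per bucket, else-branch as catch-all condition): idiomatic decomposition.


-- ===== PORT A =====
-- lista[i][j] under Pre_ (every row has ≥ 3 elements) is always in range; none is defaulted
-- (never reached inside Pre_).
def pvRow (lista : List (List Int)) (i : Nat) : List Int :=
  (PySem.List.pyGet? lista (i : Int)).getD []

def pvCell (row : List Int) (j : Nat) : Int :=
  (PySem.List.pyGet? row (j : Int)).getD 0

def sumar_recaudacion_linea (lista : List (List Int)) : Int × Int × Int :=
  (List.range lista.length).foldl
    (fun acc i =>
      let row := pvRow lista i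
      if pvCell row 0 = 1 then (acc.1 + pvCell row 2, acc.2.1, acc.2.2)
      else if pvCell row 0 = 2 then (acc.1, acc.2.1 + pvCell row 2, acc.2.2)
      else (acc.1, acc.2.1, acc.2.2 + pvCell row 2))
    (0, 0, 0)

-- ===== PORT B =====
def sumar_recaudacion_linea_alt (lista : List (List Int)) : Int × Int × Int :=
  let r1 := ((lista.filter (fun x => pvCell x 0 = 1)).map (fun x => pvCell x 2)).sum
  let r2 := ((lista.filter (fun x => pvCell x 0 = 2)).map (fun x => pvCell x 2)).sum
  let r3 := ((lista.filter (fun x => pvCell x 0 ≠ 1 ∧ pvCell x 0 ≠ 2)).map (fun x => pvCell x 2)).sum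
  (r1, r2, r3)

-- ===== PRECONDITION & SPEC =====
-- Pre_ excludes exactly the inputs with a row of fewer than 3 elements, on which A raises
-- IndexError (lista[i][0] or lista[i][2]); B raises there as well.
def Pre_sumar_recaudacion_linea (lista : List (List Int)) : Prop :=
  ∀ row ∈ lista, 3 ≤ row.length
instance (lista : List (List Int)) : Decidable (Pre_sumar_recaudacion_linea lista) := by
  unfold Pre_sumar_recaudacion_linea; infer_instance

def pvWitness_sumar_recaudacion_linea : List (List Int) := [[1, 0, 5], [2, 0, 7], [4, 0, 9]]

def Spec_sumar_recaudacion_linea (lista : List (List Int)) (out : Int × Int × Int) : Prop := out = sumar_recaudacion_linea_alt lista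
instance (lista : List (List Int)) (out : Int × Int × Int) : Decidable (Spec_sumar_recaudacion_linea lista out) := by unfold Spec_sumar_recaudacion_linea; infer_instance

-- ===== CLAIM (what is proved, stated in full; the proofs are below) =====
def Claim_equal_sumar_recaudacion_linea : Prop := ∀ (lista : List (List Int)), Dom_sumar_recaudacion_linea lista → Pre_sumar_recaudacion_linea lista → Spec_sumar_recaudacion_linea lista (sumar_recaudacion_linea lista)

-- ===== LEMMAS AND PROOFS =====

-- Indexing past the head: pyGet? (x :: xs) (i+1) = pyGet? xs i for natural i.
theorem pvRow_cons (x : List Int) (xs : List (List Int)) (i : Nat) :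
    pvRow (x :: xs) (i + 1) = pvRow xs i := by
  simp [pvRow]

-- A's fold over range (n+1) restated as one step on the head then the fold over the tail.
theorem loopA_cons (x : List Int) (xs : List (List Int)) (acc : Int × Int × Int)
    (f : (Int × Int × Int) → List Int → (Int × Int × Int))
    (_hf : ∀ a r, f a r =
      if pvCell r 0 = 1 then (a.1 + pvCell r 2, a.2.1, a.2.2)
      else if pvCell r 0 = 2 then (a.1, a.2.1 + pvCell r 2, a.2.2)
      else (a.1, a.2.1, a.2.2 + pvCell r 2)) :
    (List.range (x :: xs).length).foldl (fun a i => f a (pvRow (x :: xs) i)) acc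
      = (List.range xs.length).foldl (fun a i => f a (pvRow xs i)) (f acc x) := by
  have h0 : pvRow (x :: xs) 0 = x := by simp [pvRow]
  rw [show (x :: xs).length = xs.length + 1 from rfl, List.range_succ_eq_map]
  simp only [List.foldl_cons, List.foldl_map, h0]
  apply PySem.List.foldl_congr_mem
  intro a i _
  simp [pvRow_cons]

-- Invariant: starting A's loop body at accumulator (a,b,c) adds B's three filtered sums.
theorem loop_eq (lista : List (List Int)) (acc : Int × Int × Int) :
    (List.range lista.length).foldl
      (fun a i =>
        let row := pvRow lista i
        if pvCell row 0 = 1 then (a.1 + pvCell row 2, a.2.1, a.2.2)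
        else if pvCell row 0 = 2 then (a.1, a.2.1 + pvCell row 2, a.2.2)
        else (a.1, a.2.1, a.2.2 + pvCell row 2)) acc
      = (acc.1 + ((lista.filter (fun x => pvCell x 0 = 1)).map (fun x => pvCell x 2)).sum,
         acc.2.1 + ((lista.filter (fun x => pvCell x 0 = 2)).map (fun x => pvCell x 2)).sum,
         acc.2.2 + ((lista.filter (fun x => pvCell x 0 ≠ 1 ∧ pvCell x 0 ≠ 2)).map (fun x => pvCell x 2)).sum) := by
  induction lista generalizing acc with
  | nil => simp
  | cons x xs ih =>
    rw [loopA_cons x xs acc _ (fun a r => rfl), ih]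
    by_cases h1 : pvCell x 0 = 1
    · simp [h1, add_assoc]
    · by_cases h2 : pvCell x 0 = 2
      · simp [h2, add_assoc]
      · simp [h1, h2, add_assoc]

-- ===== VERDICT (by name: the statement is the Claim_ definition above) =====
theorem sumar_recaudacion_linea_spec : Claim_equal_sumar_recaudacion_linea := by
  intro lista _ _
  unfold Spec_sumar_recaudacion_linea sumar_recaudacion_linea sumar_recaudacion_linea_alt
  rw [loop_eq]
  simp
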